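-- pv_equiv track=rewrite | github.com/nitin22032002/leetcode_question | Carpet into Box - GFG/carpet-into-box.py | carpetBox
-- ===== SOURCE A (Python) =====
-- def carpetBox(A,B,C,D):
--     ans=0
--     A,B=min(A,B),max(A,B)
--     C,D=min(C,D),max(C,D)
--     while(A>C or B>D):
--         if(B>D):
--             B//=2
--             ans+=1
--         elif(A>C):
--             A//=2
--             ans+=1
--         A,B=min(A,B),max(A,B)
--     return ans
-- ===== SOURCE B (Python) =====
-- def carpetBox(A, B, C, D):
--     a, b = (A, B) if A <= B else (B, A)
--     c, d = (C, D) if C <= D else (D, C)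
--
--     def shrink(x, t):
--         n = 0
--         while x > t:
--             x //= 2
--             n += 1
--         return x, n
--
--     a1, i = shrink(a, d)
--     b1, j = shrink(b, d)
--     return i + j + shrink(min(a1, b1), c)[1]
-- ===== Notes on version B (the rewrite author's own statement) =====
-- stated objective: alternative
-- what changed: Replaces A's single interleaved greedy loop (re-sorting the pair and halving the current max each step) by three independent halving counters: shrink both sides against the larger box side d, then shrink the smaller remaining side against c; the total is the sum of the three counts.
import Mathlib
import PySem

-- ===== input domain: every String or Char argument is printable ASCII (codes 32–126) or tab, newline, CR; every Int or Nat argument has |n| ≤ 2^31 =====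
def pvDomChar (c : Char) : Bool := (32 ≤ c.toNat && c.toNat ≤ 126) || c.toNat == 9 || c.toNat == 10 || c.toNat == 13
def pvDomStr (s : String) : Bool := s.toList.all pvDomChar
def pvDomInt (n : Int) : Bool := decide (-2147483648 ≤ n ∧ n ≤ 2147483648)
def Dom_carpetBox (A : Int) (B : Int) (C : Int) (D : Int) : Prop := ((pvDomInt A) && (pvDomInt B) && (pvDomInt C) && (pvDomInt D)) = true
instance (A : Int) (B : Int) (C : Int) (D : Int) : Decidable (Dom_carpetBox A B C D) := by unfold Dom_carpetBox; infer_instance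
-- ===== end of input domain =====

-- B replaces A's interleaved greedy halving loop by three independent halving counters (both sides vs the larger box side, then the smaller remainder vs the smaller box side); alternative decomposition, same cost.


-- ===== PORT A =====
-- A's while loop, one fuel step per iteration; fuel 200 only makes the function
-- total — inside Pre_carpetBox (where the Python loop terminates) at most 64
-- iterations ever run (each halves a positive value bounded by 2^31).
def loopA : Nat → Int → Int → Int → Int → Int → Int
  | 0, _, _, _, _, ans => ans
  | f+1, a, b, c, d, ans =>
    if c < a ∨ d < b then
      if d < b then
        loopA f (min a (PySem.Int.floordiv b 2)) (max a (PySem.Int.floordiv b 2)) c d (ans + 1)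
      else
        loopA f (min (PySem.Int.floordiv a 2) b) (max (PySem.Int.floordiv a 2) b) c d (ans + 1)
    else ans

def carpetBox (A : Int) (B : Int) (C : Int) (D : Int) : Int :=
  loopA 200 (min A B) (max A B) (min C D) (max C D) 0

-- ===== PORT B =====
-- shrink(x, t): floor-halve x until x ≤ t, returning (final value, count);
-- fuel 200 only makes it total (inside Pre_ at most 33 halvings happen).
def shrinkF : Nat → Int → Int → Int × Int
  | 0, x, _ => (x, 0)
  | f+1, x, t =>
    if t < x then
      let p := shrinkF f (PySem.Int.floordiv x 2) t
      (p.1, p.2 + 1)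
    else (x, 0)

def carpetBox_alt (A : Int) (B : Int) (C : Int) (D : Int) : Int :=
  let a := min A B
  let b := max A B
  let c := min C D
  let d := max C D
  let p := shrinkF 200 a d
  let q := shrinkF 200 b d
  p.2 + q.2 + (shrinkF 200 (min p.1 q.1) c).2

-- ===== PRECONDITION & SPEC =====
-- Pre_ excludes exactly the inputs on which A's while loop never terminates
-- (floor-halving has fixpoints 0 and -1, so a side can never fit a box side
-- below its halving fixpoint); A returns no value outside Pre_.
def Pre_carpetBox (A : Int) (B : Int) (C : Int) (D : Int) : Prop :=
  0 ≤ min C D ∨ (0 ≤ max C D ∧ min A B ≤ min C D) ∨ (min A B ≤ min C D ∧ max A B ≤ max C D)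
instance (A : Int) (B : Int) (C : Int) (D : Int) : Decidable (Pre_carpetBox A B C D) := by unfold Pre_carpetBox; infer_instance
def pvWitness_carpetBox : Int × Int × Int × Int := (9, 4, 2, 5)

def Spec_carpetBox (A : Int) (B : Int) (C : Int) (D : Int) (out : Int) : Prop := out = carpetBox_alt A B C D
instance (A : Int) (B : Int) (C : Int) (D : Int) (out : Int) : Decidable (Spec_carpetBox A B C D out) := by unfold Spec_carpetBox; infer_instance

-- ===== CLAIM (what is proved, stated in full; the proofs are below) =====
def Claim_equal_carpetBox : Prop := ∀ (A : Int) (B : Int) (C : Int) (D : Int), Dom_carpetBox A B C D → Pre_carpetBox A B C D → Spec_carpetBox A B C D (carpetBox A B C D)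

-- ===== LEMMAS AND PROOFS =====

lemma fdiv2 (x : Int) : PySem.Int.floordiv x 2 = x / 2 :=
  PySem.Int.floordiv_eq_ediv_of_pos (by norm_num)

-- B's three counters, on an already sorted carpet (a,b) and box (c,d).
def altCore (a b c d : Int) : Int :=
  (shrinkF 200 a d).2 + (shrinkF 200 b d).2 +
    (shrinkF 200 (min (shrinkF 200 a d).1 (shrinkF 200 b d).1) c).2

lemma alt_eq (A B C D : Int) :
    carpetBox_alt A B C D = altCore (min A B) (max A B) (min C D) (max C D) := rfl

lemma shrink_noop (f : Nat) (x t : Int) (h : x ≤ t) : shrinkF f x t = (x, 0) := by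
  cases f <;> simp [shrinkF, not_lt.mpr h]

lemma shrink_fuel (n : Nat) : ∀ (x t : Int) (f g : Nat), 0 ≤ t → x < 2 ^ n →
    n ≤ f → n ≤ g → shrinkF f x t = shrinkF g x t := by
  induction n with
  | zero =>
    intro x t f g ht hx _ _
    have hx0 : x ≤ t := by simp only [pow_zero] at hx; omega
    rw [shrink_noop f x t hx0, shrink_noop g x t hx0]
  | succ n ih =>
    intro x t f g ht hx hf hg
    obtain ⟨f', rfl⟩ : ∃ f', f = f' + 1 := ⟨f - 1, by omega⟩
    obtain ⟨g', rfl⟩ : ∃ g', g = g' + 1 := ⟨g - 1, by omega⟩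
    by_cases h : t < x
    · have h2 : (2:Int) ^ (n + 1) = 2 * 2 ^ n := by ring
      have hx2 : x / 2 < 2 ^ n := by rw [h2] at hx; omega
      simp only [shrinkF, if_pos h, fdiv2]
      rw [ih (x / 2) t f' g' ht hx2 (by omega) (by omega)]
    · simp only [shrinkF, if_neg h]

lemma shrink_succ (f : Nat) (x t : Int) (h : t < x) :
    shrinkF (f + 1) x t = ((shrinkF f (x / 2) t).1, (shrinkF f (x / 2) t).2 + 1) := by
  simp [shrinkF, if_pos h]

lemma shrink_step (n : Nat) (x t : Int) (h0 : 0 ≤ t) (h1 : t < x) (hx : x < 2 ^ n)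
    (h200 : n + 1 ≤ 200) :
    shrinkF 200 x t = ((shrinkF 200 (x / 2) t).1, (shrinkF 200 (x / 2) t).2 + 1) := by
  have : shrinkF 200 x t = shrinkF (199 + 1) x t := rfl
  rw [this, shrink_succ 199 x t h1]
  rw [shrink_fuel n (x / 2) t 199 200 h0 (lt_of_le_of_lt (by omega) hx) (by omega) (by omega)]

lemma altCore_comm (a b c d : Int) : altCore a b c d = altCore b a c d := by
  unfold altCore
  rw [min_comm ((shrinkF 200 a d).1) ((shrinkF 200 b d).1)]
  ring

-- phase-1 recurrence: halving the (larger) side b against d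
lemma alt_rec_b (n : Nat) (a b c d : Int) (hd : 0 ≤ d) (hb : d < b) (hn : b < 2 ^ n)
    (h200 : n + 1 ≤ 200) : altCore a b c d = 1 + altCore a (b / 2) c d := by
  unfold altCore
  rw [shrink_step n b d hd hb hn h200]
  ring

-- phase-2 recurrence: halving the smaller side a against c, once b already fits
lemma alt_rec_a (m : Nat) (a b c d : Int) (hab : a ≤ b) (hbd : b ≤ d) (hc : 0 ≤ c)
    (hca : c < a) (hm : a < 2 ^ m) (h200 : m + 1 ≤ 200) :
    altCore a b c d = 1 + altCore (a / 2) b c d := by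
  have had : a ≤ d := hab.trans hbd
  have ha2 : a / 2 ≤ a := by omega
  unfold altCore
  rw [shrink_noop 200 a d had, shrink_noop 200 b d hbd,
      shrink_noop 200 (a / 2) d (ha2.trans had)]
  simp only [min_eq_left hab, min_eq_left (ha2.trans hab)]
  rw [shrink_step m a c hc hca hm h200]
  ring

lemma loop_done (f : Nat) (a b c d ans : Int) (hab : a ≤ b) (hcd : c ≤ d)
    (h1 : a ≤ c) (h2 : b ≤ d) : loopA f a b c d ans = ans + altCore a b c d := by
  have halt : altCore a b c d = 0 := by
    unfold altCore
    rw [shrink_noop 200 a d (h1.trans hcd), shrink_noop 200 b d h2]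
    simp [min_eq_left hab, shrink_noop 200 a c h1]
  rw [halt, add_zero]
  cases f <;> simp [loopA, not_lt.mpr h1, not_lt.mpr h2]

lemma loop_eq (k : Nat) : ∀ (m n : Nat) (a b c d ans : Int) (f : Nat),
    m + n ≤ k → m ≤ 34 → n ≤ 34 → a ≤ b → c ≤ d → a < 2 ^ m → b < 2 ^ n →
    (0 ≤ c ∨ (0 ≤ d ∧ a ≤ c) ∨ (a ≤ c ∧ b ≤ d)) → m + n ≤ f →
    loopA f a b c d ans = ans + altCore a b c d := by
  induction k with
  | zero =>
    intro m n a b c d ans f hk _ _ hab hcd ham hbn hP _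
    have hm0 : m = 0 := by omega
    have hn0 : n = 0 := by omega
    subst hm0; subst hn0
    simp only [pow_zero] at ham hbn
    refine loop_done f a b c d ans hab hcd ?_ ?_ <;> rcases hP with h | ⟨h1, h2⟩ | ⟨h1, h2⟩ <;> omega
  | succ k ih =>
    intro m n a b c d ans f hk hm34 hn34 hab hcd ham hbn hP hf
    by_cases hb : d < b
    · -- Python's  if B > D:  branch
      have hd : 0 ≤ d := by
        rcases hP with h | ⟨h1, _⟩ | ⟨_, h2⟩
        · exact h.trans hcd
        · exact h1
        · omega
      have hbpos : 0 < b := lt_of_le_of_lt hd hb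
      obtain ⟨n', rfl⟩ : ∃ n', n = n' + 1 := by
        refine ⟨n - 1, ?_⟩
        rcases Nat.eq_zero_or_pos n with h | h
        · subst h; simp only [pow_zero] at hbn; omega
        · omega
      have h2n : (2:Int) ^ (n' + 1) = 2 * 2 ^ n' := by ring
      have hb2 : b / 2 < 2 ^ n' := by rw [h2n] at hbn; omega
      have hb2nn : 0 ≤ b / 2 := by omega
      obtain ⟨f', rfl⟩ : ∃ f', f = f' + 1 := ⟨f - 1, by omega⟩
      simp only [loopA, if_pos (Or.inr hb), if_pos hb, fdiv2]
      by_cases hle : a ≤ b / 2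
      · rw [min_eq_left hle, max_eq_right hle]
        rw [ih m n' a (b / 2) c d (ans + 1) f' (by omega) hm34 (by omega) hle hcd ham hb2
            (by rcases hP with h | ⟨h1, h2⟩ | ⟨_, h2⟩
                · exact Or.inl h
                · exact Or.inr (Or.inl ⟨h1, h2⟩)
                · omega)
            (by omega)]
        rw [alt_rec_b (n' + 1) a b c d hd hb hbn (by omega)]
        ring
      · have hlt : b / 2 < a := not_le.mp hle
        rw [min_eq_right hlt.le, max_eq_left hlt.le]
        rw [ih n' m (b / 2) a c d (ans + 1) f' (by omega) (by omega) hm34 hlt.le hcd hb2 ham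
            (by rcases hP with h | ⟨h1, h2⟩ | ⟨_, h2⟩
                · exact Or.inl h
                · exact Or.inr (Or.inl ⟨h1, (hlt.le.trans h2)⟩)
                · omega)
            (by omega)]
        rw [altCore_comm (b / 2) a c d]
        rw [alt_rec_b (n' + 1) a b c d hd hb hbn (by omega)]
        ring
    · by_cases ha : c < a
      · -- Python's  elif A > C:  branch
        have hbd : b ≤ d := not_lt.mp hb
        have hc : 0 ≤ c := by
          rcases hP with h | ⟨_, h2⟩ | ⟨h1, _⟩
          · exact h
          · omega
          · omega
        have hapos : 0 < a := lt_of_le_of_lt hc ha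
        obtain ⟨m', rfl⟩ : ∃ m', m = m' + 1 := by
          refine ⟨m - 1, ?_⟩
          rcases Nat.eq_zero_or_pos m with h | h
          · subst h; simp only [pow_zero] at ham; omega
          · omega
        have h2m : (2:Int) ^ (m' + 1) = 2 * 2 ^ m' := by ring
        have ha2 : a / 2 < 2 ^ m' := by rw [h2m] at ham; omega
        have ha2le : a / 2 ≤ a := by omega
        obtain ⟨f', rfl⟩ : ∃ f', f = f' + 1 := ⟨f - 1, by omega⟩
        simp only [loopA, if_pos (Or.inl ha), if_neg hb, fdiv2]
        rw [min_eq_left (ha2le.trans hab), max_eq_right (ha2le.trans hab)]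
        rw [ih m' n (a / 2) b c d (ans + 1) f' (by omega) (by omega) hn34 (ha2le.trans hab)
            hcd ha2 hbn (Or.inl hc) (by omega)]
        rw [alt_rec_a (m' + 1) a b c d hab hbd hc ha ham (by omega)]
        ring
      · exact loop_done _ a b c d ans hab hcd (not_lt.mp ha) (not_lt.mp hb)

-- ===== VERDICT (by name: the statement is the Claim_ definition above) =====
theorem carpetBox_spec : Claim_equal_carpetBox := by
  intro A B C D hdom hpre
  unfold Spec_carpetBox
  have hd : (pvDomInt A && pvDomInt B && pvDomInt C && pvDomInt D) = true := hdom
  simp only [pvDomInt, Bool.and_eq_true, decide_eq_true_eq] at hd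
  obtain ⟨⟨⟨hA, hB⟩, hC⟩, hD⟩ := hd
  have h32 : ((2:Int) ^ (32:Nat)) = 4294967296 := by norm_num
  rw [alt_eq]
  show loopA 200 (min A B) (max A B) (min C D) (max C D) 0 =
      altCore (min A B) (max A B) (min C D) (max C D)
  rw [loop_eq 64 32 32 (min A B) (max A B) (min C D) (max C D) 0 200 (by omega) (by omega)
      (by omega) (min_le_max) (min_le_max) (by rw [h32]; omega) (by rw [h32]; omega) hpre
      (by omega)]
  ring
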